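-- pv_equiv track=rewrite | github.com/SujiGayatri/GFG | Difficulty: Basic/Find unique element/find-unique-element.py | find_unique
-- ===== SOURCE A (Python) =====
-- def find_unique(k, arr):
--     #code here
--     result = 0
--     for bit in range(32):
--         bit_sum = 0
--         for i in arr:
--             if i & (1 << bit):
--                 bit_sum += 1
--         if bit_sum % k != 0:
--             result |= (1 << bit)
--
--     return result
-- ===== SOURCE B (Python) =====
-- def _bit_table(xs):
--     # divide and conquer: per-bit set-counts of xs, merged from halves
--     if len(xs) == 0:
--         return [0] * 32
--     if len(xs) == 1:
--         x = xs[0]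
--         return [(x >> b) & 1 for b in range(32)]
--     mid = len(xs) // 2
--     left = _bit_table(xs[:mid])
--     right = _bit_table(xs[mid:])
--     return [l + r for l, r in zip(left, right)]
--
-- def find_unique(k, arr):
--     counts = _bit_table(arr)
--     result = 0
--     for b in range(32):
--         if counts[b] % k != 0:
--             result |= 1 << b
--     return result
-- ===== Notes on version B (the rewrite author's own statement) =====
-- stated objective: alternative
-- what changed: Replaces A's 32 independent linear scans of the array (one bit_sum recomputed per bit) with a recursive divide-and-conquer that builds a 32-entry per-bit count table by splitting the array in halves and merging the two half-tables elementwise, then reads the result off the table.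
import Mathlib
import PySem

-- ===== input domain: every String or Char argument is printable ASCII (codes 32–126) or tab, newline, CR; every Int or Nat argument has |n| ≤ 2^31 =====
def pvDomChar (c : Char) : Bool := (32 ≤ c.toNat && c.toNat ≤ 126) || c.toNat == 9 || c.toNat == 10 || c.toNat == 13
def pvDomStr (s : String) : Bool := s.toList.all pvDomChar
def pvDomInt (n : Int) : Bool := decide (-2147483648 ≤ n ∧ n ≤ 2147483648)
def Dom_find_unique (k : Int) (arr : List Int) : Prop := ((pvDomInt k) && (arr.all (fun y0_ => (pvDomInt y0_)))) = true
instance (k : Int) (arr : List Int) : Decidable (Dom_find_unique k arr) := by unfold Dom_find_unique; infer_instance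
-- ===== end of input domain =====

-- B replaces A's 32 per-bit scans with a recursive divide-and-conquer that merges per-bit
-- count tables of the two array halves, then a readout pass (alternative decomposition, same cost).


-- Python's '1 << bit' for the nonnegative loop indices (bit ∈ range(32), so toNat is exact)
def pvPow2 (b : Int) : Int := (1 : Int) <<< b.toNat
-- Python's 'x >> b' for the nonnegative loop indices (pins the Int-by-Nat shift instance)
def pvShr (x : Int) (n : Nat) : Int := x >>> n

-- ===== PORT A =====
def find_unique (k : Int) (arr : List Int) : Int :=
  (PySem.List.pyRange 0 32 1).foldl (fun result bit =>
    let bit_sum : Int := arr.foldl (fun s i =>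
      if PySem.Int.band i (pvPow2 bit) ≠ 0 then s + 1 else s) 0
    if PySem.Int.mod bit_sum k ≠ 0 then PySem.Int.bor result (pvPow2 bit)
    else result) 0

-- ===== PORT B =====
-- Source B's _bit_table: per-bit set-counts of xs, merged from the two halves.
-- xs[:mid] / xs[mid:] with 0 ≤ mid ≤ len are exactly List.take / List.drop;
-- Python's '(x >> b) & 1' is 'PySem.Int.band (x >>> b) 1' (b ∈ range(32) is nonnegative).
def pvBitTable : List Int → List Int
  | [] => List.replicate 32 0
  | [x] => (PySem.List.pyRange 0 32 1).map (fun b => PySem.Int.band (pvShr x b.toNat) 1)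
  | x :: y :: rest =>
      let mid := (x :: y :: rest).length / 2
      List.zipWith (· + ·) (pvBitTable ((x :: y :: rest).take mid))
        (pvBitTable ((x :: y :: rest).drop mid))
termination_by xs => xs.length
decreasing_by all_goals simp [List.length_take]; omega

def find_unique_alt (k : Int) (arr : List Int) : Int :=
  let counts := pvBitTable arr
  (PySem.List.pyRange 0 32 1).foldl (fun result b =>
    if PySem.Int.mod (counts.getD b.toNat 0) k ≠ 0 then
      PySem.Int.bor result (pvPow2 b)
    else result) 0

-- ===== PRECONDITION & SPEC =====
-- Pre_ excludes exactly k = 0, where Python's 'bit_sum % k' raises ZeroDivisionError.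
def Pre_find_unique (k : Int) (arr : List Int) : Prop := k ≠ 0
instance (k : Int) (arr : List Int) : Decidable (Pre_find_unique k arr) := by unfold Pre_find_unique; infer_instance
def pvWitness_find_unique : Int × List Int := (2, [5, 5, 7])

def Spec_find_unique (k : Int) (arr : List Int) (out : Int) : Prop := out = find_unique_alt k arr
instance (k : Int) (arr : List Int) (out : Int) : Decidable (Spec_find_unique k arr out) := by unfold Spec_find_unique; infer_instance

-- ===== CLAIM (what is proved, stated in full; the proofs are below) =====
def Claim_equal_find_unique : Prop := ∀ (k : Int) (arr : List Int), Dom_find_unique k arr → Pre_find_unique k arr → Spec_find_unique k arr (find_unique k arr)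

-- ===== LEMMAS AND PROOFS =====

lemma pvShr_eq (x : Int) (n : Nat) : pvShr x n = x >>> n := rfl

-- bit b of x, read as Python does in B ((x >> b) & 1 ≠ 0) and in A (x & (1 << b) ≠ 0), agrees
lemma pvBit_iff (x : Int) (n : Nat) :
    (PySem.Int.band (x >>> n) 1 ≠ 0) ↔ (PySem.Int.band x ((1:Int) <<< n) ≠ 0) := by
  have hp : (2:Nat) ^ n ≠ 0 := pow_ne_zero n (by norm_num)
  have h2 : ((1:Int) <<< n) = ((2 ^ n : Nat) : Int) := by
    simp [Int.shiftLeft_eq]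
  rw [h2]
  cases x with
  | ofNat m =>
    rw [show (Int.ofNat m) >>> n = ((m >>> n : Nat) : Int) from rfl,
        show (Int.ofNat m) = ((m : Nat) : Int) from rfl,
        show (1:Int) = ((1:Nat):Int) from rfl,
        PySem.Int.band_natCast, PySem.Int.band_natCast,
        Nat.and_one_is_mod, Nat.and_two_pow,
        Nat.shiftRight_eq_div_pow, ← Nat.toNat_testBit]
    cases h : m.testBit n <;> simp
  | negSucc m =>
    rw [show (Int.negSucc m) >>> n = Int.negSucc (m >>> n) from rfl]
    have hb1 : PySem.Int.band (Int.negSucc (m >>> n)) 1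
        = ((1 - (1 &&& (m >>> n)) : Nat) : Int) := by
      simp [PySem.Int.band, Int.negSucc_not_nonneg]
      rw [show ((m:Int) >>> n) = ((m >>> n : Nat) : Int) from rfl, Int.toNat_natCast]
    have hb2 : PySem.Int.band (Int.negSucc m) ((2 ^ n : Nat) : Int)
        = ((2 ^ n - (2 ^ n &&& m) : Nat) : Int) := by
      simp [PySem.Int.band, Int.negSucc_not_nonneg]
      rw [show ((2:Int) ^ n) = ((2 ^ n : Nat) : Int) from (by push_cast; ring), Int.toNat_natCast]
    rw [hb1, hb2, Nat.two_pow_and]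
    have h1 : 1 &&& (m >>> n) = (m.testBit n).toNat := by
      rw [Nat.toNat_testBit, Nat.one_and_eq_mod_two, Nat.shiftRight_eq_div_pow]
    rw [h1]
    cases h : m.testBit n <;> simp

-- (x >> n) & 1 is the 0/1 indicator of bit n
lemma pvBit_val (x : Int) (n : Nat) :
    PySem.Int.band (x >>> n) 1
      = (if PySem.Int.band (x >>> n) 1 ≠ 0 then (1:Int) else 0) := by
  have h : PySem.Int.band (x >>> n) 1 = PySem.Int.mod (x >>> n) 2 := PySem.Int.band_one _
  have h2 : PySem.Int.mod (x >>> n) 2 = (x >>> n) % 2 := by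
    unfold PySem.Int.mod
    rw [Int.fmod_eq_emod]; norm_num
  rw [h, h2]
  have := Int.emod_two_eq (x >>> n)
  rcases this with h3 | h3 <;> simp [h3]

lemma pvBitTable_length (xs : List Int) : (pvBitTable xs).length = 32 := by
  induction xs using pvBitTable.induct with
  | case1 => simp [pvBitTable]
  | case2 x => simp [pvBitTable]
  | case3 x y rest mid ihl ihr =>
    rw [pvBitTable]
    simp only [List.length_zipWith]
    rw [ihl, ihr]
    omega

-- reading entry j of a map over range(32)
lemma pvMapRange_getD (f : Int → Int) (j : Nat) (hj : j < 32) :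
    ((PySem.List.pyRange 0 32 1).map f).getD j 0 = f ((j : Nat) : Int) := by
  have hR : PySem.List.pyRange 0 32 1 = (List.range 32).map Int.ofNat := by decide
  rw [hR, List.map_map,
    List.getD_eq_getElem _ _ (by simpa using hj), List.getElem_map, List.getElem_range]
  rfl

-- entry j of the table is the number of elements with bit j set
lemma pvBitTable_getD (xs : List Int) (j : Nat) (hj : j < 32) :
    (pvBitTable xs).getD j 0
      = (xs.countP (fun x : Int => PySem.Int.band (x >>> j) 1 ≠ 0) : Int) := by
  induction xs using pvBitTable.induct with
  | case1 =>
    rw [pvBitTable]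
    rw [List.getD, List.getElem?_replicate, if_pos hj]
    simp
  | case2 x =>
    rw [pvBitTable, pvMapRange_getD _ j hj, Int.toNat_natCast, pvShr_eq]
    rw [List.countP_cons, List.countP_nil, pvBit_val x j]
    split <;> simp_all
  | case3 x y rest mid ih1 ih2 =>
    rw [pvBitTable]
    have hL := pvBitTable_length ((x :: y :: rest).take ((x :: y :: rest).length / 2))
    have hRt := pvBitTable_length ((x :: y :: rest).drop ((x :: y :: rest).length / 2))
    have hget : (List.zipWith (· + ·)
        (pvBitTable ((x :: y :: rest).take ((x :: y :: rest).length / 2)))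
        (pvBitTable ((x :: y :: rest).drop ((x :: y :: rest).length / 2)))).getD j 0
        = (pvBitTable ((x :: y :: rest).take ((x :: y :: rest).length / 2))).getD j 0
          + (pvBitTable ((x :: y :: rest).drop ((x :: y :: rest).length / 2))).getD j 0 := by
      have hjl : j < (List.zipWith (α := Int) (β := Int) (· + ·)
          (pvBitTable ((x :: y :: rest).take ((x :: y :: rest).length / 2)))
          (pvBitTable ((x :: y :: rest).drop ((x :: y :: rest).length / 2)))).length := by
        rw [List.length_zipWith, hL, hRt]; omega
      rw [List.getD_eq_getElem _ _ hjl, List.getElem_zipWith,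
        List.getD_eq_getElem _ _ (by omega), List.getD_eq_getElem _ _ (by omega)]
    rw [hget, ih1, ih2]
    rw [← Nat.cast_add, ← List.countP_append, List.take_append_drop]

-- A's per-bit scan is the same count, through the bit-reading bridge
lemma pvBitSum (arr : List Int) (b : Int) :
    arr.foldl (fun s i => if PySem.Int.band i (pvPow2 b) ≠ 0 then s + 1 else s) 0
      = (arr.countP (fun i : Int => PySem.Int.band (i >>> b.toNat) 1 ≠ 0) : Int) := by
  have h1 : arr.foldl (fun s i => if PySem.Int.band i (pvPow2 b) ≠ 0 then s + 1 else s) 0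
      = (arr.countP (fun i : Int => PySem.Int.band i (pvPow2 b) ≠ 0) : Int) := by
    simpa using PySem.List.foldl_count_if
      (fun i : Int => decide (PySem.Int.band i (pvPow2 b) ≠ 0)) arr 0
  rw [h1]
  norm_cast
  apply List.countP_congr
  intro i _
  simp only [decide_eq_true_eq]
  unfold pvPow2
  have := (pvBit_iff i b.toNat).symm
  tauto

-- ===== VERDICT (by name: the statement is the Claim_ definition above) =====
theorem find_unique_spec : Claim_equal_find_unique := by
  intro k arr _ _
  unfold Spec_find_unique find_unique find_unique_alt
  apply PySem.List.foldl_congr_mem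
  intro acc b hb
  rw [PySem.List.mem_pyRange_one] at hb
  show (if PySem.Int.mod
      (arr.foldl (fun s i => if PySem.Int.band i (pvPow2 b) ≠ 0 then s + 1 else s) 0) k ≠ 0
      then PySem.Int.bor acc (pvPow2 b) else acc) = _
  rw [pvBitSum arr b, ← pvBitTable_getD arr b.toNat (by omega)]
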